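-- pv_equiv track=rewrite | github.com/ArtemBabaiev/Uni_Comp_Discrete_Math | Lab4/functions.py | allCombinations
-- ===== SOURCE A (Python) =====
-- def del_repit(arr):
--     for subarr in arr:
--         for i in range(len(subarr)):
--             temp = subarr.pop(i)
--             if not temp in subarr:
--                 subarr.insert(i, temp)
--             else:
--                 subarr.insert(i, "")
--     return arr
--
-- def allCombinations(arr):
--     n = len(arr)
--     indices = [0 for i in range(n)]
--     allComb = []
--     while (1):
--         string = []
--         for i in range(n):
--             string.append(arr[i][indices[i]])
--         allComb.append(string)
--         next = n - 1
--         while (next >= 0 and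
--               (indices[next] + 1 >= len(arr[next]))):
--             next-=1
--
--         if (next < 0):
--             allComb = del_repit(allComb)
--             return allComb
--
--         indices[next] += 1
--
--         for i in range(next + 1, n):
--             indices[i] = 0
-- ===== SOURCE B (Python) =====
-- def allCombinations(arr):
--     # Recursive Cartesian product (first list varies slowest) + functional
--     # last-occurrence blanking pass, instead of the odometer with in-place
--     # pop/insert mutation.
--     def product(rest):
--         if not rest:
--             return [[]]
--         tails = product(rest[1:])
--         return [[x] + t for x in rest[0] for t in tails]
--
--     def blank(done, rest):
--         if not rest:
--             return done
--         x = rest[0]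
--         kept = "" if (x in done or x in rest[1:]) else x
--         return blank(done + [kept], rest[1:])
--
--     return [blank([], comb) for comb in product(arr)]
-- ===== Notes on version B (the rewrite author's own statement) =====
-- stated objective: simpler
-- what changed: Replaces the odometer while-loop over an indices array with a recursive Cartesian product (head list varies slowest) and replaces the in-place pop/insert duplicate-blanking with a functional left-to-right pass carrying the processed prefix.
import Mathlib
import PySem

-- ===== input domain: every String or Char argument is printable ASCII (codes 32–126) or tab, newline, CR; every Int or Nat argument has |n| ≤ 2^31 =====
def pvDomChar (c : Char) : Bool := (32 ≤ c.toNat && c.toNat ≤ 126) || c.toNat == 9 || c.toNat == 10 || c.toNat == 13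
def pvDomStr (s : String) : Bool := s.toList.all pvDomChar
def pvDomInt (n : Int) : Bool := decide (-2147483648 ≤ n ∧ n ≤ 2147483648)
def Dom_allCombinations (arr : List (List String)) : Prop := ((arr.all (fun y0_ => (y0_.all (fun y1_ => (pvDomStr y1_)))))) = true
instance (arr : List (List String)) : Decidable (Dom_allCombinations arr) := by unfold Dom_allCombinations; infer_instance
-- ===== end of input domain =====

-- B replaces A's odometer while-loop and in-place pop/insert blanking by a recursive
-- Cartesian product plus a functional accumulator-carrying blanking pass (objective: simpler).

-- ===== PORT A =====
-- inner 'for i in range(len(subarr))' of del_repit: state is the (mutated) list, i the position, k the remaining steps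
def delRepitLoop : List String → Nat → Nat → List String
  | cur, _, 0 => cur
  | cur, i, k + 1 =>
    match PySem.List.pop? cur (i : Int) with
    | none => cur   -- unreachable: i < cur.length throughout the loop
    | some (temp, rest) =>
      delRepitLoop
        (if !(rest.contains temp) then PySem.List.insert rest (i : Int) temp
         else PySem.List.insert rest (i : Int) "") (i + 1) k

def delRepit (arr : List (List String)) : List (List String) :=
  arr.map (fun s => delRepitLoop s 0 s.length)

-- 'next = n - 1; while next >= 0 and indices[next] + 1 >= len(arr[next]): next -= 1'
-- descending scan; 'none' is Python's next = -1
def findNextA (arr : List (List String)) (idx : List Nat) : Nat → Option Nat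
  | 0 => if (idx.getD 0 0) + 1 ≥ (arr.getD 0 []).length then none else some 0
  | k + 1 => if (idx.getD (k+1) 0) + 1 ≥ (arr.getD (k+1) []).length then findNextA arr idx k
             else some (k + 1)

-- 'for i in range(next + 1, n): indices[i] = 0'
def zeroFrom (idx : List Nat) (m n : Nat) : List Nat :=
  (List.range' m (n - m)).foldl (fun cur i => cur.set i 0) idx

-- 'indices[next] += 1' followed by the zeroing loop
def stepIdx (idx : List Nat) (next n : Nat) : List Nat :=
  zeroFrom (idx.set next (idx.getD next 0 + 1)) (next + 1) n

-- the 'while (1)' loop; fuel bounds the iteration count (each iteration appends one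
-- combination, so prodLenA arr iterations happen in total); fuel 0 is unreachable under Pre_
def goA (arr : List (List String)) (n : Nat) : Nat → List Nat → List (List String) → List (List String)
  | 0, _, acc => acc
  | fuel + 1, idx, acc =>
    -- 'string = []; for i in range(n): string.append(arr[i][indices[i]])'
    -- indexing is in range under Pre_; in Python an empty sublist raises IndexError here (see Raises_)
    let string := (List.range n).map (fun i => (arr.getD i []).getD (idx.getD i 0) "")
    let acc' := acc ++ [string]
    match (match n with | 0 => none | m + 1 => findNextA arr idx m) with
    | none => delRepit acc'
    | some next => goA arr n fuel (stepIdx idx next n) acc'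

def prodLenA (arr : List (List String)) : Nat :=
  arr.foldl (fun a l => a * l.length) 1

def allCombinations (arr : List (List String)) : List (List String) :=
  goA arr arr.length (prodLenA arr) (List.replicate arr.length 0) []

-- ===== PORT B =====
-- recursive product: [[x] + t for x in rest[0] for t in product(rest[1:])]
def prodB : List (List String) → List (List String)
  | [] => [[]]
  | l :: ls => l.flatMap (fun x => (prodB ls).map (fun t => x :: t))

-- blank(done, rest): keep rest[0] only if it occurs neither in done nor in rest[1:]
def blankB (done : List String) : List String → List String
  | [] => done
  | x :: rs => blankB (done ++ [if done.contains x || rs.contains x then "" else x]) rs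

def allCombinations_alt (arr : List (List String)) : List (List String) :=
  (prodB arr).map (blankB [])

-- ===== PRECONDITION & SPEC =====
-- Pre_ excludes exactly the inputs on which Python A raises: an empty sublist makes
-- arr[i][indices[i]] raise IndexError on the first iteration (B returns [] there).
def Pre_allCombinations (arr : List (List String)) : Prop := ∀ l ∈ arr, l ≠ []
instance (arr : List (List String)) : Decidable (Pre_allCombinations arr) := by
  unfold Pre_allCombinations; infer_instance

def pvWitness_allCombinations : List (List String) := [["a", "b"], ["a"]]

def Spec_allCombinations (arr : List (List String)) (out : List (List String)) : Prop :=
  out = allCombinations_alt arr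
instance (arr : List (List String)) (out : List (List String)) : Decidable (Spec_allCombinations arr out) := by
  unfold Spec_allCombinations; infer_instance

-- ===== CLAIM (what is proved, stated in full; the proofs are below) =====
def Claim_equal_allCombinations : Prop :=
  ∀ (arr : List (List String)), Dom_allCombinations arr → Pre_allCombinations arr →
    Spec_allCombinations arr (allCombinations arr)

-- ===== LEMMAS AND PROOFS =====

-- ---- blanking: A's pop/insert loop equals B's accumulator pass ----

theorem pop_append_cons (done rs : List String) (x : String) :
    PySem.List.pop? (done ++ x :: rs) ((done.length : Nat) : Int) = some (x, done ++ rs) := by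
  have h : done.length < (done ++ x :: rs).length := by simp
  rw [PySem.List.pop?_natCast _ _ h]
  congr 1
  refine Prod.ext ?_ ?_ <;> simp [List.getElem_append_right, List.eraseIdx_append_of_length_le]

theorem insert_append (done rs : List String) (v : String) :
    PySem.List.insert (done ++ rs) ((done.length : Nat) : Int) v = done ++ v :: rs := by
  have h : done.length ≤ (done ++ rs).length := by simp
  rw [PySem.List.insert_natCast _ _ _ h]
  simp

theorem delRepitLoop_eq_blankB (rest done : List String) :
    delRepitLoop (done ++ rest) done.length rest.length = blankB done rest := by
  induction rest generalizing done with
  | nil => simp [delRepitLoop, blankB]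
  | cons x rs ih =>
    rw [blankB, List.length_cons, delRepitLoop, pop_append_cons]
    have hc : (done ++ rs).contains x = (done.contains x || rs.contains x) := by
      simp
    by_cases h : done.contains x || rs.contains x
    · simp only [hc, h, Bool.not_true, Bool.false_eq_true, if_false, if_true, insert_append]
      simpa using ih (done ++ [""])
    · simp only at h
      simp only [hc, h, Bool.not_false, if_true, insert_append]
      simpa using ih (done ++ [x])

theorem delRepit_eq_map_blankB (xs : List (List String)) :
    delRepit xs = xs.map (blankB []) := by
  unfold delRepit
  refine List.map_congr_left (fun s _ => ?_)
  simpa using delRepitLoop_eq_blankB s []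

-- ---- odometer: successor structure ----

-- the current combination
def combC : List (List String) → List Nat → List String
  | [], _ => []
  | l :: ls, idx => l.getD (idx.headD 0) "" :: combC ls idx.tail

-- the list of combinations the odometer still emits, starting at idx
def sufProd : List (List String) → List Nat → List (List String)
  | [], _ => [[]]
  | l :: ls, idx =>
      ((sufProd ls idx.tail).map ((l.getD (idx.headD 0) "") :: ·)) ++
      ((l.drop (idx.headD 0 + 1)).flatMap (fun x => (prodB ls).map (x :: ·)))

-- the odometer successor, structurally
def succIdx : List (List String) → List Nat → Option (List Nat)
  | [], _ => none
  | l :: ls, idx =>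
    match succIdx ls idx.tail with
    | some is' => some (idx.headD 0 :: is')
    | none => if idx.headD 0 + 1 < l.length then
                some ((idx.headD 0 + 1) :: List.replicate ls.length 0)
              else none

def InR (arr : List (List String)) (idx : List Nat) : Prop :=
  List.Forall₂ (fun l i => i < l.length) arr idx

theorem sufProd_ne_nil (arr : List (List String)) (idx : List Nat) : sufProd arr idx ≠ [] := by
  induction arr generalizing idx with
  | nil => simp [sufProd]
  | cons l ls ih =>
    simp only [sufProd]
    intro h
    rcases List.append_eq_nil_iff.mp h with ⟨h1, _⟩
    exact ih idx.tail (List.map_eq_nil_iff.mp h1)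

theorem sufProd_zeros (arr : List (List String)) (h : ∀ l ∈ arr, l ≠ []) :
    sufProd arr (List.replicate arr.length 0) = prodB arr := by
  induction arr with
  | nil => simp [sufProd, prodB]
  | cons l ls ih =>
    have hl : l ≠ [] := h l (by simp)
    obtain ⟨a, t, rfl⟩ := List.exists_cons_of_ne_nil hl
    simp only [sufProd, List.length_cons, List.replicate_succ, List.headD_cons, List.tail_cons,
      prodB]
    rw [ih (fun l hl' => h l (by simp [hl']))]
    simp [List.flatMap_cons]

theorem succIdx_none (arr : List (List String)) (idx : List Nat) (hin : InR arr idx)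
    (h : succIdx arr idx = none) : sufProd arr idx = [combC arr idx] := by
  induction arr generalizing idx with
  | nil => simp [sufProd, combC]
  | cons l ls ih =>
    rcases hin with _ | ⟨hi, hin'⟩
    rename_i i is
    simp only [succIdx, List.headD_cons, List.tail_cons] at h
    cases htail : succIdx ls is with
    | some is' => rw [htail] at h; simp at h
    | none =>
      rw [htail] at h
      by_cases hlt : i + 1 < l.length
      · rw [if_pos hlt] at h; simp at h
      · have : i + 1 = l.length := by omega
        simp only [sufProd, combC, List.headD_cons, List.tail_cons, ih is hin' htail]
        rw [show l.drop (i + 1) = [] from by simp [this]]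
        simp

theorem succIdx_some (arr : List (List String)) (idx idx' : List Nat) (hin : InR arr idx)
    (h : succIdx arr idx = some idx') :
    sufProd arr idx = combC arr idx :: sufProd arr idx' := by
  induction arr generalizing idx idx' with
  | nil => simp [succIdx] at h
  | cons l ls ih =>
    rcases hin with _ | ⟨hi, hin'⟩
    rename_i i is
    simp only [succIdx, List.headD_cons, List.tail_cons] at h
    cases htail : succIdx ls is with
    | some is' =>
      rw [htail] at h
      simp only [Option.some.injEq] at h
      subst h
      simp only [sufProd, combC, List.headD_cons, List.tail_cons, ih is is' hin' htail]
      simp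
    | none =>
      rw [htail] at h
      by_cases hlt : i + 1 < l.length
      · rw [if_pos hlt] at h
        simp only [Option.some.injEq] at h
        subst h
        have hone := succIdx_none ls is hin' htail
        have hnon : ∀ m ∈ ls, m ≠ [] := by
          intro m hm
          obtain ⟨hlen, hget⟩ := List.forall₂_iff_get.mp hin'
          rcases List.mem_iff_getElem.mp hm with ⟨j, hj, rfl⟩
          have hh := hget j hj (by omega)
          simp only [List.get_eq_getElem] at hh
          exact List.ne_nil_of_length_pos (by omega)
        simp only [sufProd, combC, List.headD_cons, List.tail_cons, hone]
        rw [List.drop_eq_getElem_cons hlt, sufProd_zeros ls hnon, List.flatMap_cons,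
          show l.getD (i + 1) "" = l[i + 1] from by
            simp [List.getD_eq_getElem?_getD, List.getElem?_eq_getElem hlt]]
        simp
      · rw [if_neg hlt] at h; simp at h

theorem succIdx_InR (arr : List (List String)) (idx idx' : List Nat) (hin : InR arr idx)
    (h : succIdx arr idx = some idx') : InR arr idx' := by
  induction arr generalizing idx idx' with
  | nil => simp [succIdx] at h
  | cons l ls ih =>
    rcases hin with _ | ⟨hi, hin'⟩
    rename_i i is
    simp only [succIdx, List.headD_cons, List.tail_cons] at h
    cases htail : succIdx ls is with
    | some is' =>
      rw [htail] at h
      simp only [Option.some.injEq] at h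
      subst h
      exact List.Forall₂.cons hi (ih is is' hin' htail)
    | none =>
      rw [htail] at h
      by_cases hlt : i + 1 < l.length
      · rw [if_pos hlt] at h
        simp only [Option.some.injEq] at h
        subst h
        refine List.Forall₂.cons hlt ?_
        have hlen := List.Forall₂.length_eq hin'
        clear htail ih hi
        induction ls generalizing is with
        | nil => simp
        | cons m ms ih2 =>
          cases is with
          | nil => simp at hlen
          | cons j js =>
            rcases hin' with _ | ⟨hj, hin''⟩
            exact List.Forall₂.cons (by omega) (by simpa using ih2 hin'' (by simpa using hlen))
      · rw [if_neg hlt] at h; simp at h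

-- ---- findNext bridge ----

theorem findNextA_le (arr : List (List String)) (idx : List Nat) (k j : Nat)
    (h : findNextA arr idx k = some j) : j ≤ k := by
  induction k with
  | zero => simp only [findNextA] at h; split at h <;> simp_all
  | succ k ih =>
    simp only [findNextA] at h
    split at h
    · exact le_trans (ih h) (by omega)
    · simp_all

theorem findNextA_shift (l : List String) (ls : List (List String)) (i : Nat) (is : List Nat)
    (k : Nat) :
    findNextA (l :: ls) (i :: is) (k + 1) =
      (match findNextA ls is k with
       | some j => some (j + 1)
       | none => if i + 1 < l.length then some 0 else none) := by
  induction k with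
  | zero =>
    simp only [findNextA, List.getD_cons_succ, List.getD_cons_zero]
    by_cases h0 : (ls[0]?.getD []).length ≤ is[0]?.getD 0 + 1
    · simp only [List.getD_eq_getElem?_getD] at *
      rw [if_pos h0, if_pos h0]
      by_cases h1 : l.length ≤ i + 1
      · rw [if_pos h1, if_neg (by omega)]
      · rw [if_neg h1, if_pos (by omega)]
    · simp only [List.getD_eq_getElem?_getD] at *
      rw [if_neg h0, if_neg h0]
  | succ k ih =>
    simp only [findNextA, List.getD_cons_succ] at *
    by_cases h0 : is.getD (k + 1) 0 + 1 ≥ (ls.getD (k + 1) []).length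
    · rw [if_pos h0, if_pos h0, ih]
    · rw [if_neg h0, if_neg h0]

theorem foldl_set_zero (c : Nat) : ∀ (m : Nat) (xs : List Nat), m + c = xs.length →
    (List.range' m c).foldl (fun cur i => cur.set i 0) xs = xs.take m ++ List.replicate c 0 := by
  induction c with
  | zero =>
    intro m xs h
    have ht : xs.take m = xs := List.take_of_length_le (by omega)
    simp [ht]
  | succ c ih =>
    intro m xs h
    rw [List.range'_succ, List.foldl_cons, ih (m + 1) (xs.set m 0) (by simp; omega)]
    have hm : m < xs.length := by omega
    have hset : (xs.set m 0).take (m + 1) = xs.take m ++ [0] := by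
      rw [List.set_eq_take_append_cons_drop, if_pos hm, List.take_append]
      rw [List.take_take, Nat.min_eq_right (by omega : m ≤ m + 1)]
      simp [List.length_take, Nat.min_eq_left (le_of_lt hm)]
    rw [hset]
    simp [List.replicate_succ]

theorem stepIdx_char (idx : List Nat) (next : Nat) (h : next < idx.length) :
    stepIdx idx next idx.length =
      idx.take next ++ (idx.getD next 0 + 1) :: List.replicate (idx.length - (next + 1)) 0 := by
  unfold stepIdx zeroFrom
  rw [foldl_set_zero _ (next + 1) _ (by simp; omega)]
  have hset : (idx.set next (idx.getD next 0 + 1)).take (next + 1) =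
      idx.take next ++ [idx.getD next 0 + 1] := by
    rw [List.set_eq_take_append_cons_drop, if_pos h, List.take_append]
    rw [List.take_take, Nat.min_eq_right (by omega : next ≤ next + 1)]
    simp [List.length_take, Nat.min_eq_left (le_of_lt h)]
  rw [hset]
  simp

theorem stepIdx_cons (i : Nat) (is : List Nat) (j : Nat) (hj : j < is.length) :
    stepIdx (i :: is) (j + 1) (is.length + 1) = i :: stepIdx is j is.length := by
  rw [show is.length + 1 = (i :: is).length from by simp]
  rw [stepIdx_char (i :: is) (j + 1) (by simp; omega), stepIdx_char is j hj]
  simp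

theorem findNext_bridge (arr : List (List String)) (idx : List Nat)
    (hlen : idx.length = arr.length) :
    (match (match arr.length with | 0 => none | m + 1 => findNextA arr idx m) with
     | none => none
     | some k => some (stepIdx idx k arr.length)) = succIdx arr idx := by
  induction arr generalizing idx with
  | nil => simp [succIdx]
  | cons l ls ih =>
    cases idx with
    | nil => simp at hlen
    | cons i is =>
      have hlen' : is.length = ls.length := by simpa using hlen
      simp only [List.length_cons, succIdx, List.headD_cons, List.tail_cons]
      cases ls with
      | nil =>
        have he : is = [] := List.eq_nil_of_length_eq_zero (by simpa using hlen')
        subst he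
        show (match findNextA [l] [i] 0 with
              | none => none
              | some k => some (stepIdx [i] k 1)) =
             (if i + 1 < l.length then some [i + 1] else none)
        by_cases hge : l.length ≤ i + 1
        · have hf : findNextA [l] [i] 0 = none := by simp [findNextA, hge]
          rw [hf, if_neg (by omega)]
        · have hf : findNextA [l] [i] 0 = some 0 := by simp [findNextA]; omega
          have hs : stepIdx [i] 0 1 = [i + 1] := by simp [stepIdx, zeroFrom]
          rw [hf, if_pos (by omega)]
          show some (stepIdx [i] 0 1) = some [i + 1]
          rw [hs]
      | cons m ms =>
        have hlen2 : is.length = ms.length + 1 := by simpa using hlen'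
        have ihx := ih is hlen'
        show (match findNextA (l :: m :: ms) (i :: is) (ms.length + 1) with
              | none => none
              | some k => some (stepIdx (i :: is) k (ms.length + 1 + 1))) =
             (match succIdx (m :: ms) is with
              | some is' => some (i :: is')
              | none => if i + 1 < l.length then some ((i + 1) :: List.replicate (ms.length + 1) 0)
                        else none)
        cases hf : findNextA (m :: ms) is ms.length with
        | some j =>
          have hj : j ≤ ms.length := findNextA_le _ _ _ _ hf
          have ihx2 : succIdx (m :: ms) is = some (stepIdx is j (ms.length + 1)) := by
            rw [← ihx]
            show (match findNextA (m :: ms) is ms.length with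
                  | none => none
                  | some k => some (stepIdx is k (ms.length + 1))) = _
            rw [hf]
          rw [findNextA_shift, hf, ihx2]
          show some (stepIdx (i :: is) (j + 1) (ms.length + 1 + 1)) =
               some (i :: stepIdx is j (ms.length + 1))
          rw [show ms.length + 1 = is.length from hlen2.symm]
          exact congrArg some (stepIdx_cons i is j (by omega))
        | none =>
          have ihx2 : succIdx (m :: ms) is = none := by
            rw [← ihx]
            show (match findNextA (m :: ms) is ms.length with
                  | none => none
                  | some k => some (stepIdx is k (ms.length + 1))) = _
            rw [hf]
          rw [findNextA_shift, hf, ihx2]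
          by_cases hlt : i + 1 < l.length
          · rw [if_pos hlt, if_pos hlt]
            show some (stepIdx (i :: is) 0 (ms.length + 1 + 1)) =
                 some ((i + 1) :: List.replicate (ms.length + 1) 0)
            have hs : stepIdx (i :: is) 0 (ms.length + 1 + 1) =
                (i + 1) :: List.replicate (ms.length + 1) 0 := by
              rw [show ms.length + 1 + 1 = (i :: is).length from by simp [hlen2]]
              rw [stepIdx_char (i :: is) 0 (by simp)]
              simp [hlen2]
            rw [hs]
          · rw [if_neg hlt, if_neg hlt]

-- ---- the combination built each iteration ----

theorem string_eq_combC (arr : List (List String)) (idx : List Nat)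
    (hlen : idx.length = arr.length) :
    (List.range arr.length).map (fun i => (arr.getD i []).getD (idx.getD i 0) "") =
      combC arr idx := by
  induction arr generalizing idx with
  | nil => simp [combC]
  | cons l ls ih =>
    cases idx with
    | nil => simp at hlen
    | cons i is =>
      simp only [List.length_cons, List.range_succ_eq_map, List.map_cons, List.map_map, combC,
        List.headD_cons, List.tail_cons, List.getD_cons_zero]
      rw [← ih is (by simpa using hlen)]
      simp [Function.comp_def]

-- ---- main loop ----

theorem goA_eq (fuel : Nat) : ∀ (arr : List (List String)) (idx : List Nat)
    (acc : List (List String)), InR arr idx → (sufProd arr idx).length ≤ fuel →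
    goA arr arr.length fuel idx acc = delRepit (acc ++ sufProd arr idx) := by
  induction fuel with
  | zero =>
    intro arr idx acc _ hf
    have := sufProd_ne_nil arr idx
    have : 0 < (sufProd arr idx).length := List.length_pos_of_ne_nil this
    omega
  | succ fuel ih =>
    intro arr idx acc hin hf
    have hlen : idx.length = arr.length := (List.Forall₂.length_eq hin).symm
    have hunf : goA arr arr.length (fuel + 1) idx acc =
        (match (match arr.length with | 0 => none | m + 1 => findNextA arr idx m) with
         | none => delRepit (acc ++ [(List.range arr.length).map
             (fun i => (arr.getD i []).getD (idx.getD i 0) "")])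
         | some next => goA arr arr.length fuel (stepIdx idx next arr.length)
             (acc ++ [(List.range arr.length).map
               (fun i => (arr.getD i []).getD (idx.getD i 0) "")])) := rfl
    rw [hunf]
    simp only [string_eq_combC arr idx hlen]
    have hb := findNext_bridge arr idx hlen
    cases hs : succIdx arr idx with
    | none =>
      rw [hs] at hb
      cases hm : (match arr.length with | 0 => none | m + 1 => findNextA arr idx m) with
      | none =>
        rw [succIdx_none arr idx hin hs]
      | some k => rw [hm] at hb; simp at hb
    | some idx' =>
      rw [hs] at hb
      cases hm : (match arr.length with | 0 => none | m + 1 => findNextA arr idx m) with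
      | none => rw [hm] at hb; simp at hb
      | some k =>
        rw [hm] at hb
        simp only [Option.some.injEq] at hb
        have hstep := succIdx_some arr idx idx' hin hs
        show goA arr arr.length fuel (stepIdx idx k arr.length) (acc ++ [combC arr idx]) =
             delRepit (acc ++ sufProd arr idx)
        rw [hb, ih arr idx' (acc ++ [combC arr idx]) (succIdx_InR arr idx idx' hin hs)
          (by rw [hstep] at hf; simp at hf ⊢; omega)]
        rw [hstep]
        simp

theorem length_prodB (arr : List (List String)) : (prodB arr).length = (arr.map List.length).prod := by
  induction arr with
  | nil => simp [prodB]
  | cons l ls ih => simp [prodB, List.length_flatMap, ih, List.map_const', List.sum_replicate, smul_eq_mul]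

theorem prodLenA_eq (arr : List (List String)) : prodLenA arr = (arr.map List.length).prod := by
  unfold prodLenA
  suffices h : ∀ a, arr.foldl (fun a l => a * l.length) a = a * (arr.map List.length).prod by
    simpa using h 1
  induction arr with
  | nil => simp
  | cons l ls ih => intro a; simp [List.foldl_cons, ih, List.prod_cons]; ring

theorem InR_zeros (arr : List (List String)) (h : ∀ l ∈ arr, l ≠ []) :
    InR arr (List.replicate arr.length 0) := by
  induction arr with
  | nil => exact List.Forall₂.nil
  | cons l ls ih =>
    simp only [List.length_cons, List.replicate_succ]
    exact List.Forall₂.cons (List.length_pos_of_ne_nil (h l (by simp)))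
      (ih (fun m hm => h m (by simp [hm])))

-- ===== VERDICT (by name: the statement is the Claim_ definition above) =====
theorem allCombinations_spec : Claim_equal_allCombinations := by
  intro arr _ hpre
  unfold Spec_allCombinations allCombinations allCombinations_alt
  rw [goA_eq (prodLenA arr) arr (List.replicate arr.length 0) [] (InR_zeros arr hpre)
    (by rw [sufProd_zeros arr hpre, length_prodB, prodLenA_eq])]
  rw [List.nil_append, sufProd_zeros arr hpre, delRepit_eq_map_blankB]
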